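-- pv_equiv track=rewrite | github.com/ksparavec/traceroute_simulator | ansible/process_facts.py | _extract_custom_chains
-- ===== SOURCE A (Python) =====
-- def _extract_custom_chains(iptables_output: str) -> set:
--     """
--     Extract all custom chain names from iptables output.
--
--     Args:
--         iptables_output: Raw iptables output containing all tables
--
--     Returns:
--         Set of custom chain names
--     """
--     custom_chains = set()
--
--     # Standard built-in chains that are not custom
--     builtin_chains = {'INPUT', 'OUTPUT', 'FORWARD', 'PREROUTING', 'POSTROUTING'}
--
--     lines = iptables_output.split('\n')
--     for line in lines:
--         line = line.strip()
--
--         # Look for chain definitions: "Chain CHAINNAME (...)"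
--         if line.startswith('Chain '):
--             parts = line.split()
--             if len(parts) >= 2:
--                 chain_name = parts[1]
--                 # If not a builtin chain, it's custom
--                 if chain_name not in builtin_chains:
--                     custom_chains.add(chain_name)
--
--     return custom_chains
-- ===== SOURCE B (Python) =====
-- import re
--
-- # One multiline regex scan over the whole text instead of an explicit
-- # line loop with strip/startswith/split.
-- _CHAIN_RE = re.compile(r'^[ \t\r\f\v]*Chain [ \t\r\f\v]*(\S+)', re.MULTILINE)
--
-- _BUILTIN_CHAINS = {'INPUT', 'OUTPUT', 'FORWARD', 'PREROUTING', 'POSTROUTING'}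
--
--
-- def _extract_custom_chains(iptables_output: str) -> set:
--     return set(_CHAIN_RE.findall(iptables_output)) - _BUILTIN_CHAINS
-- ===== Notes on version B (the rewrite author's own statement) =====
-- stated objective: idiomatic
-- what changed: Replaces the explicit line loop with strip/startswith/split by a single compiled MULTILINE regex scan over the whole text whose matches are collected with re.findall and turned into a set minus the builtin-chain constants.
import Mathlib
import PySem

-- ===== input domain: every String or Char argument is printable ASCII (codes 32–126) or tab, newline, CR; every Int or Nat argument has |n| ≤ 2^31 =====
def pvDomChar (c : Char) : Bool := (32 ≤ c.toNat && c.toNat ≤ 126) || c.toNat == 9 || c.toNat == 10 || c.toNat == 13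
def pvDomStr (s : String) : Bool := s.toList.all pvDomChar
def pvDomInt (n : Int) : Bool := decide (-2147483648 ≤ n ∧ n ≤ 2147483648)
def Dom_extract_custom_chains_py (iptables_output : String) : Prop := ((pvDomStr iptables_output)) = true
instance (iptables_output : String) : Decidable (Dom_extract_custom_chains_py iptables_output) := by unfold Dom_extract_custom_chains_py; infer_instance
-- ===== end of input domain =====

-- B replaces A's explicit line loop (strip/startswith/split) by one compiled
-- MULTILINE-regex scan over the whole text; objective: idiomatic, same O(n) cost.

-- ===== PORT A =====
def extract_custom_chains_py (iptables_output : String) : List String :=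
  let builtin_chains : PySem.Set String :=
    PySem.Set.ofList ["INPUT", "OUTPUT", "FORWARD", "PREROUTING", "POSTROUTING"]
  -- iptables_output.split('\n'): the separator is nonempty, so split? is `some`; getD unwraps
  let lines : List String := (PySem.Str.split? iptables_output "\n").getD []
  lines.foldl
    (fun custom_chains line =>
      let line := PySem.Str.strip line
      if PySem.Str.startswith line "Chain " then
        let parts := PySem.Str.split₀ line
        if 2 ≤ parts.length then
          match PySem.List.pyGet? parts 1 with
          | some chain_name =>
              if !(PySem.Set.contains builtin_chains chain_name) then
                PySem.Set.add custom_chains chain_name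
              else custom_chains
          | none => custom_chains
        else custom_chains
      else custom_chains)
    PySem.Set.empty

-- ===== PORT B =====
-- B's regex character classes, by code point (exact on the ASCII domain):
-- [ \t\r\f\v] (whitespace the pattern may skip, no newline) and \S.
def pvReWs (c : Char) : Bool :=
  c.toNat == 32 || c.toNat == 9 || c.toNat == 13 || c.toNat == 12 || c.toNat == 11

def pvReNonWs (c : Char) : Bool :=
  !(c.toNat == 32 || (9 ≤ c.toNat && c.toNat ≤ 13))

-- hand port (PySem has no regex) of attempting the pattern
-- '[ \t\r\f\v]*Chain [ \t\r\f\v]*(\S+)' at one anchor position; exact: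
-- the engine skips the class, matches the literal 'Chain ', skips the class,
-- then takes the maximal nonempty \S+ run as the capture.
def pvMatchChain (cs : List Char) : Option String :=
  let u := cs.dropWhile pvReWs
  if ("Chain ".toList).isPrefixOf u then
    let tok := ((u.drop 6).dropWhile pvReWs).takeWhile pvReNonWs
    if tok.isEmpty then none else some (String.ofList tok)
  else none

-- hand port of re.findall with the ^-anchored MULTILINE pattern: the pattern is
-- attempted at every line start (it cannot cross '\n', and ^ never matches
-- mid-line, so trying each anchor in order yields exactly findall's matches).
def pvFindall : List Char → Bool → List String
  | [], _ => []
  | c :: rest, atStart =>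
      (if atStart then (pvMatchChain (c :: rest)).toList else []) ++ pvFindall rest (c == '\n')

def extract_custom_chains_py_alt (iptables_output : String) : List String :=
  PySem.Set.diff (PySem.Set.ofList (pvFindall iptables_output.toList true))
    (PySem.Set.ofList ["INPUT", "OUTPUT", "FORWARD", "PREROUTING", "POSTROUTING"])

-- ===== PRECONDITION & SPEC =====
def Spec_extract_custom_chains_py (iptables_output : String) (out : List String) : Prop := out = extract_custom_chains_py_alt iptables_output
instance (iptables_output : String) (out : List String) : Decidable (Spec_extract_custom_chains_py iptables_output out) := by unfold Spec_extract_custom_chains_py; infer_instance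

-- ===== CLAIM (what is proved, stated in full; the proofs are below) =====
def Claim_equal_extract_custom_chains_py : Prop := ∀ (iptables_output : String), Dom_extract_custom_chains_py iptables_output → Spec_extract_custom_chains_py iptables_output (extract_custom_chains_py iptables_output)

-- ===== LEMMAS AND PROOFS =====

-- proof-only reference functions
def pvNotNl (c : Char) : Bool := c != '\n'

def pvSplitNl : List Char → List (List Char)
  | [] => [[]]
  | c :: rest =>
    if c == '\n' then [] :: pvSplitNl rest
    else
      match pvSplitNl rest with
      | [] => [[c]]
      | p :: ps => (c :: p) :: ps

def pvWords : List Char → List (List Char)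
  | [] => []
  | c :: rest =>
    if PySem.Chars.isspace c then pvWords rest
    else (c :: rest.takeWhile (fun x => !PySem.Chars.isspace x)) ::
         pvWords (rest.dropWhile (fun x => !PySem.Chars.isspace x))
termination_by l => l.length
decreasing_by
  · simp
  · have := List.length_dropWhile_le (fun x => !PySem.Chars.isspace x) rest
    simp; omega

-- pointwise character-class facts on the domain
lemma pvReNonWs_eq (c : Char) (h : pvDomChar c = true) :
    pvReNonWs c = !PySem.Chars.isspace c := by
  unfold pvReNonWs pvDomChar at *
  simp only [PySem.Chars.isspace]
  simp only [Bool.or_eq_true, Bool.and_eq_true, beq_iff_eq, decide_eq_true_eq] at h ⊢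
  rw [Bool.eq_iff_iff]
  simp only [Bool.not_eq_true', Bool.or_eq_false_iff, Bool.and_eq_false_iff,
    decide_eq_false_iff_not, not_le, beq_eq_false_iff_ne, ne_eq]
  omega

lemma pvReWs_eq (c : Char) (h : pvDomChar c = true) (hn : c ≠ '\n') :
    pvReWs c = PySem.Chars.isspace c := by
  have h10 : c.toNat ≠ 10 := fun hh => hn (Char.ext (UInt32.toNat_inj.mp hh))
  unfold pvReWs pvDomChar at *
  simp only [PySem.Chars.isspace]
  simp only [Bool.or_eq_true, Bool.and_eq_true, beq_iff_eq, decide_eq_true_eq] at h ⊢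
  rw [Bool.eq_iff_iff]
  simp only [Bool.or_eq_true, Bool.and_eq_true, beq_iff_eq, decide_eq_true_eq]
  omega

-- predicate congruence for takeWhile/dropWhile
lemma pvTakeWhile_congr {α : Type} (p q : α → Bool) :
    ∀ l : List α, (∀ x ∈ l, p x = q x) → l.takeWhile p = l.takeWhile q := by
  intro l
  induction l with
  | nil => intro _; rfl
  | cons x xs ih =>
    intro h
    simp only [List.takeWhile_cons]
    rw [h x (by simp)]
    cases q x with
    | false => simp
    | true => simp [ih (fun y hy => h y (by simp [hy]))]

lemma pvDropWhile_congr {α : Type} (p q : α → Bool) :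
    ∀ l : List α, (∀ x ∈ l, p x = q x) → l.dropWhile p = l.dropWhile q := by
  intro l
  induction l with
  | nil => intro _; rfl
  | cons x xs ih =>
    intro h
    simp only [List.dropWhile_cons]
    rw [h x (by simp)]
    cases q x with
    | false => simp
    | true => simp [ih (fun y hy => h y (by simp [hy]))]

-- splitOn '\n' characterisation
lemma pvSplitNl_ne_nil (cs : List Char) : pvSplitNl cs ≠ [] := by
  induction cs with
  | nil => simp [pvSplitNl]
  | cons c rest ih =>
    simp only [pvSplitNl]
    split
    · simp
    · split <;> simp

lemma pvSplitOn_go (l : List Char) : ∀ (fuel : ℕ) (cur : List Char) (acc : List (List Char)),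
    l.length < fuel →
    PySem.Chars.splitOn.go ['\n'] fuel l cur acc =
      acc.reverse ++ (match pvSplitNl l with
        | [] => []
        | p :: ps => (cur.reverse ++ p) :: ps) := by
  induction l with
  | nil =>
    intro fuel cur acc h
    cases fuel with
    | zero => omega
    | succ n =>
      rw [PySem.Chars.splitOn.go.eq_def]
      simp [pvSplitNl]
  | cons c rest ih =>
    intro fuel cur acc h
    cases fuel with
    | zero => omega
    | succ n =>
      rw [PySem.Chars.splitOn.go.eq_def]
      by_cases hc : c = '\n'
      · subst hc
        have hpre : (['\n'].isPrefixOf ('\n' :: rest)) = true := by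
          simp [List.isPrefixOf]
        simp only [hpre, if_true, List.length_cons, List.length_nil, List.drop_succ_cons,
          List.drop_zero]
        rw [ih n [] (cur.reverse :: acc) (by simpa using Nat.lt_of_succ_lt_succ h)]
        cases h' : pvSplitNl rest with
        | nil => exact absurd h' (pvSplitNl_ne_nil rest)
        | cons p ps => simp [pvSplitNl, h']
      · have hpre : (['\n'].isPrefixOf (c :: rest)) = false := by
          simp [List.isPrefixOf]
          exact fun hh => absurd hh.symm hc
        simp only [hpre, Bool.false_eq_true, if_false]
        rw [ih n (c :: cur) acc (by simpa using Nat.lt_of_succ_lt_succ h)]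
        cases h' : pvSplitNl rest with
        | nil => exact absurd h' (pvSplitNl_ne_nil rest)
        | cons p ps => simp [pvSplitNl, h', hc]

lemma pvSplitOn_nl (cs : List Char) : PySem.Chars.splitOn cs ['\n'] = pvSplitNl cs := by
  unfold PySem.Chars.splitOn
  rw [pvSplitOn_go cs (cs.length + 1) [] [] (by omega)]
  cases h : pvSplitNl cs with
  | nil => exact absurd h (pvSplitNl_ne_nil cs)
  | cons p ps => simp

-- split() characterisation
lemma pvSplit₀_go (l : List Char) : ∀ (cur : List Char) (acc : List (List Char)),
    PySem.Chars.split₀.go l cur acc =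
      acc.reverse ++ (if cur.isEmpty then pvWords l
        else (cur.reverse ++ l.takeWhile (fun x => !PySem.Chars.isspace x)) ::
          pvWords (l.dropWhile (fun x => !PySem.Chars.isspace x))) := by
  induction l with
  | nil =>
    intro cur acc
    rw [PySem.Chars.split₀.go.eq_def]
    cases cur <;> simp [pvWords]
  | cons c rest ih =>
    intro cur acc
    rw [PySem.Chars.split₀.go.eq_def]
    by_cases hc : PySem.Chars.isspace c
    · simp only [hc, if_true]
      cases cur with
      | nil =>
        rw [ih [] acc]
        simp [pvWords, hc]
      | cons x xs =>
        rw [ih [] ((x :: xs).reverse :: acc)]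
        simp [pvWords, hc, List.takeWhile_cons, List.dropWhile_cons]
    · simp only [hc, Bool.false_eq_true, if_false]
      rw [ih (c :: cur) acc]
      cases cur <;>
        simp [pvWords, hc, List.takeWhile_cons, List.dropWhile_cons, List.append_assoc]

lemma pvSplit₀_eq (cs : List Char) : PySem.Chars.split₀ cs = pvWords cs := by
  unfold PySem.Chars.split₀
  rw [pvSplit₀_go cs [] []]
  simp

-- pvWords lemmas
lemma pvWords_all_space (l : List Char) (h : ∀ x ∈ l, PySem.Chars.isspace x = true) :
    pvWords l = [] := by
  induction l with
  | nil => simp [pvWords]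
  | cons c rest ih =>
    rw [pvWords, if_pos (h c (by simp))]
    exact ih (fun x hx => h x (by simp [hx]))

lemma pvWords_append_space (b : List Char) (hb : ∀ x ∈ b, PySem.Chars.isspace x = true) :
    ∀ a : List Char, pvWords (a ++ b) = pvWords a := by
  intro a
  induction ha : a.length using Nat.strong_induction_on generalizing a with
  | _ n ih =>
  subst ha
  cases a with
  | nil =>
    rw [List.nil_append, pvWords_all_space b hb]
    simp [pvWords]
  | cons c a' =>
    by_cases hc : PySem.Chars.isspace c
    · rw [List.cons_append, pvWords, if_pos hc, pvWords, if_pos hc]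
      exact ih a'.length (by simp) a' rfl
    · have htb : b.takeWhile (fun x => !PySem.Chars.isspace x) = [] := by
        cases b with
        | nil => rfl
        | cons x xs => simp [List.takeWhile_cons, hb x (by simp)]
      have hdb : b.dropWhile (fun x => !PySem.Chars.isspace x) = b := by
        cases b with
        | nil => rfl
        | cons x xs => simp [List.dropWhile_cons, hb x (by simp)]
      have ht : (a' ++ b).takeWhile (fun x => !PySem.Chars.isspace x)
          = a'.takeWhile (fun x => !PySem.Chars.isspace x) := by
        rw [List.takeWhile_append]
        split
        · rename_i hlen
          rw [htb, List.append_nil]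
          exact ((List.takeWhile_prefix _).eq_of_length hlen).symm
        · rfl
      rw [List.cons_append, pvWords, if_neg hc, pvWords, if_neg hc, ht]
      congr 1
      rw [List.dropWhile_append]
      split
      · rename_i hnil
        rw [List.isEmpty_iff] at hnil
        rw [hnil, hdb]
        simpa [pvWords] using pvWords_all_space b hb
      · rename_i hnil
        rw [List.isEmpty_iff] at hnil
        have hlen : (a'.dropWhile (fun x => !PySem.Chars.isspace x)).length ≤ a'.length :=
          List.length_dropWhile_le _ _
        exact ih (a'.dropWhile (fun x => !PySem.Chars.isspace x)).length (by simp; omega) _ rfl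

lemma pvWords_dropWhile (l : List Char) :
    pvWords (l.dropWhile PySem.Chars.isspace) = pvWords l := by
  induction l with
  | nil => rfl
  | cons c rest ih =>
    by_cases hc : PySem.Chars.isspace c
    · rw [List.dropWhile_cons, if_pos hc, pvWords, if_pos hc]
      exact ih
    · rw [List.dropWhile_cons, if_neg hc]

-- rstrip lemmas
lemma pvRstrip_prefix (l : List Char) : PySem.Chars.rstrip l <+: l := by
  unfold PySem.Chars.rstrip
  have h2 : (List.dropWhile PySem.Chars.isspace l.reverse).reverse <+: l.reverse.reverse :=
    List.reverse_prefix.mpr (List.dropWhile_suffix _)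
  simpa using h2

lemma pvRstrip_append_space (a b : List Char) (hb : ∀ x ∈ b, PySem.Chars.isspace x = true) :
    PySem.Chars.rstrip (a ++ b) = PySem.Chars.rstrip a := by
  unfold PySem.Chars.rstrip
  rw [List.reverse_append, List.dropWhile_append]
  have hnil : List.dropWhile PySem.Chars.isspace b.reverse = [] :=
    List.dropWhile_eq_nil_iff.mpr (fun x hx => hb x (by simpa using hx))
  simp [hnil]

lemma pvRstrip_append_keep (a b : List Char) (hb : ¬ ∀ x ∈ b, PySem.Chars.isspace x = true) :
    PySem.Chars.rstrip (a ++ b) = a ++ PySem.Chars.rstrip b := by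
  unfold PySem.Chars.rstrip
  rw [List.reverse_append, List.dropWhile_append]
  have hnil : List.dropWhile PySem.Chars.isspace b.reverse ≠ [] := by
    intro hh
    exact hb (fun x hx => List.dropWhile_eq_nil_iff.mp hh x (by simpa using hx))
  rw [if_neg (by simpa [List.isEmpty_iff] using hnil)]
  simp

lemma pvRstrip_decompose (l : List Char) :
    ∃ b, l = PySem.Chars.rstrip l ++ b ∧ ∀ x ∈ b, PySem.Chars.isspace x = true := by
  refine ⟨(l.reverse.takeWhile PySem.Chars.isspace).reverse, ?_, ?_⟩
  · unfold PySem.Chars.rstrip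
    conv_lhs => rw [← l.reverse_reverse,
      ← List.takeWhile_append_dropWhile (p := PySem.Chars.isspace) (l := l.reverse)]
    rw [List.reverse_append]
  · intro x hx
    exact List.mem_takeWhile_imp (by simpa using hx)

lemma pvWords_rstrip (l : List Char) : pvWords (PySem.Chars.rstrip l) = pvWords l := by
  obtain ⟨b, hb, hsp⟩ := pvRstrip_decompose l
  conv_rhs => rw [hb]
  rw [pvWords_append_space b hsp]

-- prefix transfer through an appended marker character
lemma pvPrefix_transfer {α : Type} (p a b : List α) (c : α)
    (h : p <+: a ++ c :: b) (hc : c ∉ p) : p <+: a := by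
  by_cases hl : p.length ≤ a.length
  · have hp := List.prefix_iff_eq_take.mp h
    rw [List.take_append] at hp
    rw [Nat.sub_eq_zero_of_le hl] at hp
    simp only [List.take_zero, List.append_nil] at hp
    rw [hp]
    exact List.take_prefix _ _
  · exfalso
    apply hc
    have hlen : a.length < p.length := Nat.lt_of_not_le hl
    have h1 := h.getElem hlen
    rw [List.getElem_append_right (le_refl a.length)] at h1
    simp only [Nat.sub_self, List.getElem_cons_zero] at h1
    rw [← h1]
    exact List.getElem_mem _

-- head of a dropWhile fails the predicate
lemma pvDropWhile_head {α : Type} (p : α → Bool) :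
    ∀ (l : List α) (c : α) (tl : List α), l.dropWhile p = c :: tl → p c = false := by
  intro l
  induction l with
  | nil => intro c tl h; simp at h
  | cons x xs ih =>
    intro c tl h
    rw [List.dropWhile_cons] at h
    by_cases hx : p x
    · rw [if_pos hx] at h
      exact ih _ _ h
    · rw [if_neg hx] at h
      cases h
      simpa using hx

-- matchChain only looks at the first line
lemma pvDropWhile_reWs_append (x y : List Char) :
    (x ++ '\n' :: y).dropWhile pvReWs = x.dropWhile pvReWs ++ '\n' :: y := by
  induction x with
  | nil =>
    have h : pvReWs '\n' = false := by decide
    simp [List.dropWhile_cons, h]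
  | cons c x' ih =>
    simp only [List.cons_append, List.dropWhile_cons]
    cases h : pvReWs c <;> simp [ih]

lemma pvTakeWhile_reNonWs_append (x y : List Char) :
    (x ++ '\n' :: y).takeWhile pvReNonWs = x.takeWhile pvReNonWs := by
  induction x with
  | nil =>
    have h : pvReNonWs '\n' = false := by decide
    simp [List.takeWhile_cons, h]
  | cons c x' ih =>
    simp only [List.cons_append, List.takeWhile_cons]
    cases h : pvReNonWs c <;> simp [ih]

lemma pvMatchChain_append_nl (pre tl : List Char) :
    pvMatchChain (pre ++ '\n' :: tl) = pvMatchChain pre := by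
  simp only [pvMatchChain]
  rw [pvDropWhile_reWs_append]
  by_cases hp : (("Chain ".toList).isPrefixOf (pre.dropWhile pvReWs)) = true
  · have hp' := List.isPrefixOf_iff_prefix.mp hp
    have hlen : ("Chain ".toList).length ≤ (pre.dropWhile pvReWs).length := hp'.length_le
    have hpre2 : (("Chain ".toList).isPrefixOf (pre.dropWhile pvReWs ++ '\n' :: tl)) = true :=
      List.isPrefixOf_iff_prefix.mpr (hp'.trans (List.prefix_append _ _))
    rw [if_pos hpre2, if_pos hp]
    rw [List.drop_append_of_le_length (by simpa using hlen)]
    rw [pvDropWhile_reWs_append, pvTakeWhile_reNonWs_append]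
  · have hp2 : ¬ (("Chain ".toList).isPrefixOf (pre.dropWhile pvReWs ++ '\n' :: tl)) = true := by
      intro hh
      exact hp (List.isPrefixOf_iff_prefix.mpr
        (pvPrefix_transfer _ _ _ _ (List.isPrefixOf_iff_prefix.mp hh) (by decide)))
    rw [if_neg hp2, if_neg hp]

lemma pvMatchChain_takeWhile (cs : List Char) :
    pvMatchChain cs = pvMatchChain (cs.takeWhile pvNotNl) := by
  cases h : cs.dropWhile pvNotNl with
  | nil =>
    have ht : cs.takeWhile pvNotNl = cs := by
      conv_rhs => rw [← List.takeWhile_append_dropWhile (p := pvNotNl) (l := cs)]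
      rw [h, List.append_nil]
    rw [ht]
  | cons c tl =>
    have hc : c = '\n' := by
      have := pvDropWhile_head pvNotNl cs c tl h
      simpa [pvNotNl] using this
    subst hc
    conv_lhs => rw [← List.takeWhile_append_dropWhile (p := pvNotNl) (l := cs), h]
    rw [pvMatchChain_append_nl]

-- pvSplitNl structure
lemma pvSplitNl_head (cs : List Char) :
    ∃ ps, pvSplitNl cs = cs.takeWhile pvNotNl :: ps := by
  induction cs with
  | nil => exact ⟨[], by simp [pvSplitNl]⟩
  | cons c rest ih =>
    by_cases hc : c = '\n'
    · subst hc
      refine ⟨pvSplitNl rest, ?_⟩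
      simp [pvSplitNl, List.takeWhile_cons, pvNotNl]
    · obtain ⟨ps, hps⟩ := ih
      refine ⟨ps, ?_⟩
      have hb : (c == '\n') = false := by simpa using hc
      simp only [pvSplitNl, hb, Bool.false_eq_true, if_false, hps, List.takeWhile_cons]
      have : pvNotNl c = true := by simpa [pvNotNl] using hc
      simp [this]

lemma pvMem_pvSplitNl (cs : List Char) :
    ∀ l ∈ pvSplitNl cs, l ⊆ cs ∧ '\n' ∉ l := by
  induction cs with
  | nil =>
    intro l hl
    simp [pvSplitNl] at hl
    simp [hl]
  | cons c rest ih =>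
    intro l hl
    by_cases hc : c = '\n'
    · subst hc
      simp only [pvSplitNl, beq_self_eq_true, if_true, List.mem_cons] at hl
      rcases hl with rfl | hl
      · simp
      · obtain ⟨h1, h2⟩ := ih l hl
        exact ⟨h1.trans (List.subset_cons_self _ _), h2⟩
    · have hb : (c == '\n') = false := by simpa using hc
      obtain ⟨ps, hps⟩ := pvSplitNl_head rest
      simp only [pvSplitNl, hb, Bool.false_eq_true, if_false, hps, List.mem_cons] at hl
      rcases hl with rfl | hl
      · constructor
        · apply List.cons_subset_cons
          exact (List.takeWhile_sublist _).subset
        · simp only [List.mem_cons]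
          push_neg
          refine ⟨fun hh => hc hh.symm, fun hh => ?_⟩
          have := List.mem_takeWhile_imp hh
          simp [pvNotNl] at this
      · have hl' : l ∈ pvSplitNl rest := by rw [hps]; exact List.mem_cons_of_mem _ hl
        obtain ⟨h1, h2⟩ := ih l hl'
        exact ⟨h1.trans (List.subset_cons_self _ _), h2⟩

-- findall scan lemmas
lemma pvFindall_true (cs : List Char) :
    pvFindall cs true = (pvSplitNl cs).flatMap (fun l => (pvMatchChain l).toList) := by
  have main : ∀ cs : List Char,
      pvFindall cs true = (pvSplitNl cs).flatMap (fun l => (pvMatchChain l).toList)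
      ∧ pvFindall cs false = ((pvSplitNl cs).tail).flatMap (fun l => (pvMatchChain l).toList) := by
    intro cs
    induction cs with
    | nil =>
      constructor <;> simp [pvFindall, pvSplitNl, pvMatchChain]
    | cons c rest ih =>
      by_cases hc : c = '\n'
      · subst hc
        have hm : pvMatchChain ('\n' :: rest) = none := by
          unfold pvMatchChain
          have h1 : pvReWs '\n' = false := by decide
          rw [List.dropWhile_cons, if_neg (by simp [h1])]
        have hsplit : pvSplitNl ('\n' :: rest) = [] :: pvSplitNl rest := by
          simp [pvSplitNl]
        constructor
        · simp only [pvFindall, hsplit, List.flatMap_cons, hm, beq_self_eq_true,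
            Option.toList_none, List.nil_append, if_true]
          exact ih.1
        · simp only [pvFindall, if_neg (by simp : ¬ false = true), List.nil_append,
            hsplit, List.tail_cons, beq_self_eq_true]
          exact ih.1
      · have hb : (c == '\n') = false := by simpa using hc
        obtain ⟨ps, hps⟩ := pvSplitNl_head rest
        have hsplit : pvSplitNl (c :: rest) = (c :: rest.takeWhile pvNotNl) :: ps := by
          simp [pvSplitNl, hb, hps]
        have htw : (c :: rest).takeWhile pvNotNl = c :: rest.takeWhile pvNotNl := by
          rw [List.takeWhile_cons, if_pos (by simpa [pvNotNl] using hc)]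
        have hmc : pvMatchChain (c :: rest) = pvMatchChain (c :: rest.takeWhile pvNotNl) := by
          rw [pvMatchChain_takeWhile (c :: rest), htw]
        constructor
        · simp only [pvFindall, hsplit, List.flatMap_cons, hb, if_true]
          rw [ih.2, hps, List.tail_cons, hmc]
        · simp only [pvFindall, if_neg (by simp : ¬ false = true), List.nil_append, hb,
            hsplit, List.tail_cons]
          rw [ih.2, hps, List.tail_cons]
  exact (main cs).1

-- the per-line equivalence: A's strip/startswith/split step computes B's match
lemma pvPerLine (l : List Char) (hDom : ∀ c ∈ l, pvDomChar c = true) (hNl : '\n' ∉ l)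
    (builtin : PySem.Set String) (acc : PySem.Set String) :
    (let line := PySem.Str.strip (String.ofList l)
     if PySem.Str.startswith line "Chain " then
       let parts := PySem.Str.split₀ line
       if 2 ≤ parts.length then
         match PySem.List.pyGet? parts 1 with
         | some chain_name =>
             if !(PySem.Set.contains builtin chain_name) then PySem.Set.add acc chain_name
             else acc
         | none => acc
       else acc
     else acc)
    = match pvMatchChain l with
      | some n => if !(PySem.Set.contains builtin n) then PySem.Set.add acc n else acc
      | none => acc := by
  have hDom' : ∀ c ∈ l, pvDomChar c = true := hDom
  have hdl : l.dropWhile pvReWs = l.dropWhile PySem.Chars.isspace :=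
    pvDropWhile_congr _ _ l (fun x hx => pvReWs_eq x (hDom x hx) (fun he => hNl (he ▸ hx)))
  have hdsub : l.dropWhile PySem.Chars.isspace ⊆ l := (List.dropWhile_sublist _).subset
  simp only [PySem.Str.strip, PySem.Str.startswith, PySem.Str.split₀, String.toList_ofList]
  show (if PySem.Chars.startswith (PySem.Chars.strip l) "Chain ".toList then _ else acc) = _
  unfold PySem.Chars.strip PySem.Chars.lstrip
  simp only [pvMatchChain]
  rw [hdl]
  by_cases hp : ("Chain ".toList <+: l.dropWhile PySem.Chars.isspace)
  case neg =>
    have hA : PySem.Chars.startswith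
        (PySem.Chars.rstrip (l.dropWhile PySem.Chars.isspace)) "Chain ".toList = false := by
      rw [Bool.eq_false_iff]
      intro hh
      exact hp ((PySem.Chars.startswith_iff _ _).mp hh |>.trans (pvRstrip_prefix _))
    have hB : (("Chain ".toList).isPrefixOf (l.dropWhile PySem.Chars.isspace)) = false := by
      rw [Bool.eq_false_iff]
      exact fun hh => hp (List.isPrefixOf_iff_prefix.mp hh)
    rw [hA, hB]
    simp
  case pos =>
    obtain ⟨r, hr⟩ := hp
    have hrsub : ∀ x ∈ r, x ∈ l := by
      intro x hx
      exact hdsub (hr ▸ List.mem_append_right _ hx)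
    have hdrop6 : (l.dropWhile PySem.Chars.isspace).drop 6 = r := by
      rw [← hr, show (6:ℕ) = ("Chain ".toList).length from rfl, List.drop_left]
    have hpre : (("Chain ".toList).isPrefixOf (l.dropWhile PySem.Chars.isspace)) = true :=
      List.isPrefixOf_iff_prefix.mpr ⟨r, hr⟩
    have hdr : r.dropWhile pvReWs = r.dropWhile PySem.Chars.isspace :=
      pvDropWhile_congr _ _ r
        (fun x hx => pvReWs_eq x (hDom x (hrsub x hx)) (fun he => hNl (he ▸ hrsub x hx)))
    rw [if_pos hpre, hdrop6, hdr]
    by_cases hall : ∀ x ∈ r, PySem.Chars.isspace x = true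
    case pos =>
      -- token empty on B's side; A's stripped line is exactly "Chain", startswith fails
      have hnil : r.dropWhile PySem.Chars.isspace = [] := List.dropWhile_eq_nil_iff.mpr hall
      have hd2 : l.dropWhile PySem.Chars.isspace = "Chain".toList ++ (' ' :: r) := by
        rw [← hr]; rfl
      have hsp : ∀ x ∈ (' ' :: r), PySem.Chars.isspace x = true := by
        intro x hx
        rcases List.mem_cons.mp hx with rfl | hx
        · decide
        · exact hall x hx
      have hA : PySem.Chars.rstrip (l.dropWhile PySem.Chars.isspace) = "Chain".toList := by
        rw [hd2, pvRstrip_append_space _ _ hsp]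
        decide
      rw [hA, hnil]
      have hsw : PySem.Chars.startswith ("Chain".toList) "Chain ".toList = false := by decide
      rw [hsw]
      simp
    case neg =>
      -- nonempty token
      obtain ⟨c₀, r2, h1⟩ : ∃ c₀ r2, r.dropWhile PySem.Chars.isspace = c₀ :: r2 := by
        cases h1 : r.dropWhile PySem.Chars.isspace with
        | nil => exact absurd (List.dropWhile_eq_nil_iff.mp h1) hall
        | cons a b => exact ⟨a, b, rfl⟩
      have hc₀ : PySem.Chars.isspace c₀ = false := pvDropWhile_head _ r _ _ h1
      have hsubr1 : ∀ x ∈ c₀ :: r2, x ∈ l := by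
        intro x hx
        exact hrsub x ((List.dropWhile_sublist _).subset (h1 ▸ hx))
      have htw : (c₀ :: r2).takeWhile pvReNonWs
          = (c₀ :: r2).takeWhile (fun x => !PySem.Chars.isspace x) :=
        pvTakeWhile_congr _ _ _ (fun x hx => pvReNonWs_eq x (hDom x (hsubr1 x hx)))
      rw [h1, htw, List.takeWhile_cons]
      simp only [hc₀, Bool.not_false, if_true]
      have hB : (List.isEmpty (c₀ :: List.takeWhile (fun x => !PySem.Chars.isspace x) r2)) = false := by
        simp
      rw [hB]
      simp only [Bool.false_eq_true, if_false]
      -- A's side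
      have hA : PySem.Chars.rstrip (l.dropWhile PySem.Chars.isspace)
          = "Chain ".toList ++ PySem.Chars.rstrip r := by
        rw [← hr, pvRstrip_append_keep _ _ hall]
      rw [hA]
      have hsw : PySem.Chars.startswith ("Chain ".toList ++ PySem.Chars.rstrip r)
          "Chain ".toList = true :=
        (PySem.Chars.startswith_iff _ _).mpr (List.prefix_append _ _)
      rw [if_pos hsw]
      have hCf : PySem.Chars.isspace 'C' = false := by decide
      have hhf : PySem.Chars.isspace 'h' = false := by decide
      have haf : PySem.Chars.isspace 'a' = false := by decide
      have hif : PySem.Chars.isspace 'i' = false := by decide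
      have hnf : PySem.Chars.isspace 'n' = false := by decide
      have hspt : PySem.Chars.isspace ' ' = true := by decide
      have hwords : PySem.Chars.split₀ ("Chain ".toList ++ PySem.Chars.rstrip r)
          = "Chain".toList :: (c₀ :: r2.takeWhile (fun x => !PySem.Chars.isspace x))
              :: pvWords (r2.dropWhile (fun x => !PySem.Chars.isspace x)) := by
        rw [pvSplit₀_eq]
        rw [show "Chain ".toList = 'C' :: 'h' :: 'a' :: 'i' :: 'n' :: ' ' :: ([] : List Char)
          from rfl]
        simp only [List.cons_append, List.nil_append]
        rw [pvWords, if_neg (by simp [hCf])]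
        simp only [List.takeWhile_cons, List.dropWhile_cons, hCf, hhf, haf, hif, hnf, hspt,
          Bool.not_false, Bool.not_true, if_true, Bool.false_eq_true, if_false]
        rw [pvWords, if_pos hspt]
        rw [pvWords_rstrip, ← pvWords_dropWhile r, h1]
        rw [pvWords, if_neg (by simp [hc₀])]
        rfl
      rw [hwords]
      have hlen : 2 ≤ (List.map String.ofList
          ("Chain".toList :: (c₀ :: r2.takeWhile (fun x => !PySem.Chars.isspace x))
            :: pvWords (r2.dropWhile (fun x => !PySem.Chars.isspace x)))).length := by
        simp
      rw [if_pos hlen]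
      have hget : PySem.List.pyGet? (List.map String.ofList
          ("Chain".toList :: (c₀ :: r2.takeWhile (fun x => !PySem.Chars.isspace x))
            :: pvWords (r2.dropWhile (fun x => !PySem.Chars.isspace x)))) 1
          = some (String.ofList (c₀ :: r2.takeWhile (fun x => !PySem.Chars.isspace x))) := by
        simp [PySem.List.pyGet?, PySem.List.pyIdx?]
      rw [hget]

-- folding a conditional add = foldl add over a filter
lemma pvFold_condAdd (builtin : PySem.Set String) :
    ∀ (names : List String) (acc : PySem.Set String),
      names.foldl (fun a n => if !(PySem.Set.contains builtin n) then PySem.Set.add a n else a) acc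
        = (names.filter (fun n => !(PySem.Set.contains builtin n))).foldl PySem.Set.add acc := by
  intro names
  induction names with
  | nil => intro acc; rfl
  | cons n ns ih =>
    intro acc
    simp only [List.foldl_cons, List.filter_cons]
    cases h : PySem.Set.contains builtin n with
    | false =>
      simp only [h, Bool.not_false, if_true, List.foldl_cons]
      exact ih _
    | true =>
      simp only [h, Bool.not_true, Bool.false_eq_true, if_false]
      exact ih _

lemma pvFilter_foldl_add (p : String → Bool) :
    ∀ (xs : List String) (acc : List String),
      (xs.foldl PySem.Set.add acc).filter p = (xs.filter p).foldl PySem.Set.add (acc.filter p) := by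
  intro xs
  induction xs with
  | nil => intro acc; rfl
  | cons x xs ih =>
    intro acc
    simp only [List.foldl_cons, List.filter_cons]
    have hstep : (PySem.Set.add acc x).filter p
        = (if p x then PySem.Set.add (List.filter p acc) x else List.filter p acc) := by
      unfold PySem.Set.add PySem.Set.contains
      by_cases hm : x ∈ acc
      · rw [if_pos (List.elem_eq_true_of_mem hm)]
        by_cases hpx : p x
        · rw [if_pos hpx]
          rw [if_pos (List.elem_eq_true_of_mem (List.mem_filter.mpr ⟨hm, hpx⟩))]
        · rw [if_neg hpx]
      · rw [if_neg (by simpa using hm)]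
        rw [List.filter_append]
        by_cases hpx : p x
        · rw [if_pos hpx]
          have hnm : x ∉ List.filter p acc := fun hh => hm (List.mem_filter.mp hh).1
          rw [if_neg (by simpa using hnm)]
          simp [hpx]
        · rw [if_neg hpx]
          simp [hpx]
    rw [ih, hstep]
    by_cases hpx : p x
    · rw [if_pos hpx, if_pos hpx, List.foldl_cons]
    · rw [if_neg hpx, if_neg hpx]

lemma pvCondAdd_eq_diff (builtin : PySem.Set String) (names : List String) :
    names.foldl (fun a n => if !(PySem.Set.contains builtin n) then PySem.Set.add a n else a)
        PySem.Set.empty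
      = PySem.Set.diff (PySem.Set.ofList names) builtin := by
  rw [pvFold_condAdd]
  unfold PySem.Set.diff PySem.Set.ofList PySem.Set.empty PySem.Set.contains
  rw [pvFilter_foldl_add]
  rfl

lemma pvFold_match_flatMap (builtin : PySem.Set String) :
    ∀ (ls : List (List Char)) (acc : PySem.Set String),
      ls.foldl (fun acc l =>
          match pvMatchChain l with
          | some n => if !(PySem.Set.contains builtin n) then PySem.Set.add acc n else acc
          | none => acc) acc
        = (ls.flatMap (fun l => (pvMatchChain l).toList)).foldl
            (fun a n => if !(PySem.Set.contains builtin n) then PySem.Set.add a n else a) acc := by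
  intro ls
  induction ls with
  | nil => intro acc; rfl
  | cons l ls ih =>
    intro acc
    simp only [List.foldl_cons, List.flatMap_cons, List.foldl_append]
    cases h : pvMatchChain l with
    | none => simp only [h, Option.toList_none, List.foldl_nil]; exact ih _
    | some n => simp only [h, Option.toList_some, List.foldl_cons, List.foldl_nil]; exact ih _

lemma pvFoldLines (builtin : PySem.Set String) :
    ∀ (ls : List (List Char)), (∀ l ∈ ls, (∀ c ∈ l, pvDomChar c = true) ∧ '\n' ∉ l) →
    ∀ acc : PySem.Set String,
      (ls.map String.ofList).foldl (fun custom_chains line =>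
          let line := PySem.Str.strip line
          if PySem.Str.startswith line "Chain " then
            let parts := PySem.Str.split₀ line
            if 2 ≤ parts.length then
              match PySem.List.pyGet? parts 1 with
              | some chain_name =>
                  if !(PySem.Set.contains builtin chain_name) then
                    PySem.Set.add custom_chains chain_name
                  else custom_chains
              | none => custom_chains
            else custom_chains
          else custom_chains) acc
      = ls.foldl (fun acc l =>
          match pvMatchChain l with
          | some n => if !(PySem.Set.contains builtin n) then PySem.Set.add acc n else acc
          | none => acc) acc := by
  intro ls
  induction ls with
  | nil => intro _ acc; rfl
  | cons l ls ih =>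
    intro h acc
    simp only [List.map_cons, List.foldl_cons]
    rw [pvPerLine l (h l (by simp)).1 (h l (by simp)).2 builtin acc]
    exact ih (fun x hx => h x (by simp [hx])) _

-- ===== VERDICT (by name: the statement is the Claim_ definition above) =====
theorem extract_custom_chains_py_spec : Claim_equal_extract_custom_chains_py := by
  intro s hdom
  unfold Spec_extract_custom_chains_py
  have hDomL : ∀ c ∈ s.toList, pvDomChar c = true := by
    intro c hc
    unfold Dom_extract_custom_chains_py pvDomStr at hdom
    exact List.all_eq_true.mp hdom c hc
  simp only [extract_custom_chains_py, extract_custom_chains_py_alt]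
  have hsplit : PySem.Str.split? s "\n"
      = some ((pvSplitNl s.toList).map String.ofList) := by
    unfold PySem.Str.split? PySem.Chars.split?
    rw [show "\n".toList = ['\n'] from rfl]
    rw [if_neg (by decide)]
    rw [pvSplitOn_nl]
    rfl
  rw [hsplit, Option.getD_some]
  rw [pvFoldLines _ (pvSplitNl s.toList)
    (fun l hl => ⟨fun c hc => hDomL c ((pvMem_pvSplitNl s.toList l hl).1 hc),
      (pvMem_pvSplitNl s.toList l hl).2⟩) PySem.Set.empty]
  rw [pvFold_match_flatMap, ← pvFindall_true, pvCondAdd_eq_diff]
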